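-- pv_equiv track=rewrite | github.com/AR-Calder/PyPattern | pattern.py | pattern_create
-- ===== SOURCE A (Python) =====
-- def pattern_create(length):
--     pattern = ""
--
--     low = ['A', 'a', '0']
--     char = low.copy()
--     high_char = ['Z', 'z', '9']
--
--     while char != high_char and len(pattern) <= length:
--         pattern += ''.join(char)
--         char[2] = chr(ord(char[2]) + 1)
--
--         if char[2] == chr(ord(high_char[2]) + 1):
--             i = 2
--             while i > 0 and char[i] == chr(ord(high_char[i]) + 1):
--                 char[i] = low[i]
--                 if i != 0:
--                     char[i - 1] = chr(ord(char[i - 1]) + 1)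
--                 i -= 1
--
--     pattern += ''.join(char)
--     return pattern
-- ===== SOURCE B (Python) =====
-- def pattern_create(length):
--     groups = (u + l + d
--               for u in 'ABCDEFGHIJKLMNOPQRSTUVWXYZ'
--               for l in 'abcdefghijklmnopqrstuvwxyz'
--               for d in '0123456789')
--     pattern = ""
--     g = next(groups)
--     while g != 'Zz9' and len(pattern) <= length:
--         pattern += g
--         g = next(groups)
--     return pattern + g
-- ===== Notes on version B (the rewrite author's own statement) =====
-- stated objective: idiomatic
-- what changed: Replaces the mutable three-slot odometer with its nested carry while-loop by a generator over the ordered product of the uppercase, lowercase and digit alphabets; the outer loop just pulls successive groups from it.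
import Mathlib
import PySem

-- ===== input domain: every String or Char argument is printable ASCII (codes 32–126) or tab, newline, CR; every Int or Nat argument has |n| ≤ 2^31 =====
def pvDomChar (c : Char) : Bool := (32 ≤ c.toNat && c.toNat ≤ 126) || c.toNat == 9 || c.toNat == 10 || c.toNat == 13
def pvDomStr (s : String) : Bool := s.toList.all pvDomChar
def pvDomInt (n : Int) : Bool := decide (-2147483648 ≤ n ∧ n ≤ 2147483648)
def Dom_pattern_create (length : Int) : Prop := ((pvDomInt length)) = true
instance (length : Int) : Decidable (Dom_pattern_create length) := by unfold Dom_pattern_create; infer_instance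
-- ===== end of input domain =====

-- B replaces A's 3-slot odometer with its inner carry loop by a generator over the ordered
-- product of the three alphabets, pulled by the same outer loop; objective: idiomatic.


-- ===== PORT A =====
-- chr(ord(c) + 1); exact for every char reached here (codes < 0xD800)
def pcSucc (c : Char) : Char := Char.ofNat (c.toNat + 1)

-- the inner `while i > 0 and char[i] == chr(ord(high_char[i]) + 1)` carry loop, recursing on i
-- (list indexing via getD: the indices are always in range for the 3-element lists)
def pcInner : Nat → List Char → List Char
  | 0, char => char
  | i+1, char =>
    if char.getD (i+1) ' ' = pcSucc (['Z', 'z', '9'].getD (i+1) ' ') then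
      let char := char.set (i+1) (['A', 'a', '0'].getD (i+1) ' ')
      let char := char.set i (pcSucc (char.getD i ' '))
      pcInner i char
    else char

-- the outer while loop (pattern kept as List Char); fuel 6760 exceeds the at most
-- 6759 iterations the Python loop ever performs
def pcLoop : Nat → List Char → List Char → Int → List Char × List Char
  | 0, pattern, char, _ => (pattern, char)
  | fuel+1, pattern, char, length =>
    if char ≠ ['Z', 'z', '9'] ∧ (pattern.length : Int) ≤ length then
      let pattern := pattern ++ char
      let char := char.set 2 (pcSucc (char.getD 2 ' '))
      let char := if char.getD 2 ' ' = pcSucc '9' then pcInner 2 char else char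
      pcLoop fuel pattern char length
    else (pattern, char)

def pattern_create (length : Int) : String :=
  String.ofList ((pcLoop 6760 [] ['A', 'a', '0'] length).1 ++ (pcLoop 6760 [] ['A', 'a', '0'] length).2)

-- ===== PORT B =====
-- the generator `(u + l + d for u in … for l in … for d in …)`, materialised in order
def pbGroups : List (List Char) :=
  "ABCDEFGHIJKLMNOPQRSTUVWXYZ".toList.flatMap fun u =>
    "abcdefghijklmnopqrstuvwxyz".toList.flatMap fun l =>
      "0123456789".toList.map fun d => [u, l, d]

-- `g = next(groups); while g != 'Zz9' and len(pattern) <= length: …; return pattern + g`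
-- ([] is unreachable: the generator's last item is 'Zz9', which stops the loop)
def pbLoop : List (List Char) → List Char → Int → List Char
  | [], pattern, _ => pattern
  | g :: rest, pattern, length =>
    if g ≠ ['Z', 'z', '9'] ∧ (pattern.length : Int) ≤ length then
      pbLoop rest (pattern ++ g) length
    else pattern ++ g

def pattern_create_alt (length : Int) : String :=
  String.ofList (pbLoop pbGroups [] length)

-- ===== PRECONDITION & SPEC =====
def Spec_pattern_create (length : Int) (out : String) : Prop := out = pattern_create_alt length
instance (length : Int) (out : String) : Decidable (Spec_pattern_create length out) := by unfold Spec_pattern_create; infer_instance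

-- ===== CLAIM (what is proved, stated in full; the proofs are below) =====
def Claim_equal_pattern_create : Prop := ∀ (length : Int), Dom_pattern_create length → Spec_pattern_create length (pattern_create length)

-- ===== LEMMAS AND PROOFS =====

-- the k-th 3-char group both programs emit
def pcGrp (k : Nat) : List Char :=
  [Char.ofNat (65 + k / 260), Char.ofNat (97 + k / 10 % 26), Char.ofNat (48 + k % 10)]

-- index of the last group emitted (the state A's outer loop stops in)
def pcStop (length : Int) : Nat :=
  if length < 0 then 0 else min (length.toNat / 3 + 1) 6759

theorem pcToNatOfNat (n : Nat) (h : n < 55296) : (Char.ofNat n).toNat = n := by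
  rw [Char.toNat_ofNat, if_pos (Or.inl h : n.isValidChar)]

theorem pcOfNatEq {a b : Nat} (ha : a < 55296) (hb : b < 55296) :
    (Char.ofNat a = Char.ofNat b) ↔ a = b := by
  constructor
  · intro h; have := congrArg Char.toNat h
    rwa [pcToNatOfNat a ha, pcToNatOfNat b hb] at this
  · intro h; rw [h]

theorem pcGrp_length (k : Nat) : (pcGrp k).length = 3 := rfl

theorem pcGrp_last : pcGrp 6759 = ['Z', 'z', '9'] := by decide

theorem pcGrp_eq_last {k : Nat} (h : pcGrp k = ['Z', 'z', '9']) : 6759 ≤ k := by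
  unfold pcGrp at h
  rw [show ('Z' : Char) = Char.ofNat 90 from rfl, show ('z' : Char) = Char.ofNat 122 from rfl,
    show ('9' : Char) = Char.ofNat 57 from rfl] at h
  simp only [List.cons.injEq, and_true] at h
  obtain ⟨h1, h2, h3⟩ := h
  by_cases hq : 65 + k / 260 < 55296
  · rw [pcOfNatEq (by omega) (by omega)] at h1
    rw [pcOfNatEq (by omega) (by omega)] at h2
    rw [pcOfNatEq (by omega) (by omega)] at h3
    omega
  · omega

theorem pcStop_le (length : Int) : pcStop length ≤ 6759 := by
  unfold pcStop; split <;> omega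

-- one outer-loop body's update of `char` advances the group index by one
theorem pcStep (k : Nat) (hk : k < 6760) :
    (let char := (pcGrp k).set 2 (pcSucc ((pcGrp k).getD 2 ' '));
     if char.getD 2 ' ' = pcSucc '9' then pcInner 2 char else char) = pcGrp (k + 1) := by
  have h9n : ('9' : Char).toNat = 57 := rfl
  simp only [pcGrp, pcSucc, List.getD, List.set, List.getElem?_cons_zero, List.getElem?_cons_succ,
    Option.getD_some, h9n]
  rw [pcToNatOfNat _ (by omega)]
  by_cases h9 : k % 10 = 9
  · rw [if_pos (by rw [pcOfNatEq (by omega) (by omega)]; omega)]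
    simp only [pcInner, List.getD, List.set, List.getElem?_cons_zero, List.getElem?_cons_succ,
      Option.getD_some, pcSucc, h9n]
    rw [if_pos (by rw [pcOfNatEq (by omega) (by omega)]; omega)]
    have hzn : ('z' : Char).toNat = 122 := rfl
    rw [hzn, pcToNatOfNat (97 + k / 10 % 26) (by omega), pcToNatOfNat (65 + k / 260) (by omega)]
    by_cases h25 : k / 10 % 26 = 25
    · rw [if_pos (by rw [pcOfNatEq (by omega) (by omega)]; omega)]
      simp only [List.cons.injEq, and_true]
      refine ⟨congrArg Char.ofNat (by omega), ?_, ?_⟩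
      · show ('a' : Char) = Char.ofNat (97 + (k+1)/10 % 26)
        rw [show (97 + (k+1)/10 % 26) = 97 by omega]
      · show ('0' : Char) = Char.ofNat (48 + (k+1) % 10)
        rw [show (48 + (k+1) % 10) = 48 by omega]
    · rw [if_neg (by rw [pcOfNatEq (by omega) (by omega)]; omega)]
      simp only [List.cons.injEq, and_true]
      refine ⟨congrArg Char.ofNat (by omega), congrArg Char.ofNat (by omega), ?_⟩
      show ('0' : Char) = Char.ofNat (48 + (k+1) % 10)
      rw [show (48 + (k+1) % 10) = 48 by omega]
  · rw [if_neg (by rw [pcOfNatEq (by omega) (by omega)]; omega)]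
    simp only [List.cons.injEq, and_true]
    exact ⟨congrArg Char.ofNat (by omega), congrArg Char.ofNat (by omega),
      congrArg Char.ofNat (by omega)⟩

-- A's loop, started at group k with k groups already emitted, appends groups k … pcStop
theorem pcLoop_out (length : Int) : ∀ (fuel k : Nat) (pat : List Char),
    k ≤ pcStop length → pcStop length - k < fuel → pat.length = 3 * k →
    (pcLoop fuel pat (pcGrp k) length).1 ++ (pcLoop fuel pat (pcGrp k) length).2
      = pat ++ (List.range' k (pcStop length - k + 1)).flatMap pcGrp := by
  intro fuel
  induction fuel with
  | zero => intro k pat h1 h2 _; omega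
  | succ f ih =>
    intro k pat hk hf hp
    by_cases hc : pcGrp k ≠ ['Z', 'z', '9'] ∧ ((pat.length : Int) ≤ length)
    · have hk9 : k ≠ 6759 := fun h => hc.1 (h ▸ pcGrp_last)
      have hlen : (3 * (k : Int)) ≤ length := by
        have := hc.2; rw [hp] at this; exact_mod_cast this
      have hs : pcStop length = min (length.toNat / 3 + 1) 6759 := by
        unfold pcStop; rw [if_neg (by omega)]
      have hks : k < pcStop length := by rw [hs]; rw [hs] at hk; omega
      have hstep := pcStep k (by omega)
      simp only at hstep
      have hunf : pcLoop (f + 1) pat (pcGrp k) length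
          = pcLoop f (pat ++ pcGrp k) (pcGrp (k + 1)) length := by
        rw [pcLoop, if_pos hc]; dsimp only; rw [hstep]
      rw [hunf, ih (k + 1) (pat ++ pcGrp k) (by omega) (by omega)
        (by rw [List.length_append, hp, pcGrp_length]; omega)]
      rw [show pcStop length - k + 1 = (pcStop length - (k + 1)) + 1 + 1 by omega,
        List.range'_succ, List.flatMap_cons, List.range'_succ, List.flatMap_cons]
      simp [List.append_assoc]
      rw [List.range'_succ, List.flatMap_cons]
    · have hse : pcStop length = k := by
        rcases not_and_or.mp hc with h | h
        · have h' : pcGrp k = ['Z', 'z', '9'] := not_not.mp h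
          have := pcGrp_eq_last h'
          have := pcStop_le length
          omega
        · have h' : ¬ ((3 * (k : Int)) ≤ length) := by
            intro h''; exact h (by rw [hp]; exact_mod_cast h'')
          have : pcStop length ≤ k := by
            unfold pcStop; split <;> omega
          omega
      have hunf : pcLoop (f + 1) pat (pcGrp k) length = (pat, pcGrp k) := by
        rw [pcLoop, if_neg hc]
      rw [hunf, hse]
      simp

-- the generator's output is exactly groups 0 … 6759 in order
-- enumerating a product in row-major order equals one range with div/mod decoding
theorem pcProd {α : Type} (B : Nat) (hB : 0 < B) (f : Nat → Nat → α) : ∀ (A : Nat),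
    (List.range A).flatMap (fun a => (List.range B).map (fun b => f a b))
      = (List.range (A * B)).map (fun k => f (k / B) (k % B)) := by
  intro A
  induction A with
  | zero => simp
  | succ A ih =>
    rw [List.range_succ, List.flatMap_append, ih, List.flatMap_cons, List.flatMap_nil,
      List.append_nil, show (A + 1) * B = A * B + B by ring, List.range_add,
      List.map_append, List.map_map]
    congr 1
    refine List.map_congr_left (fun b hb => ?_)
    have hb' : b < B := List.mem_range.mp hb
    simp only [Function.comp_apply]
    rw [show A * B + b = b + A * B by ring, Nat.add_mul_div_right b A hB,
      Nat.div_eq_of_lt hb', Nat.zero_add, Nat.add_mul_mod_self_right,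
      Nat.mod_eq_of_lt hb']

theorem pbGroups_eq : pbGroups = (List.range' 0 6760).map pcGrp := by
  rw [← List.range_eq_range']
  unfold pbGroups
  rw [show "ABCDEFGHIJKLMNOPQRSTUVWXYZ".toList
      = (List.range 26).map (fun a => Char.ofNat (65 + a)) by decide,
    show "abcdefghijklmnopqrstuvwxyz".toList
      = (List.range 26).map (fun b => Char.ofNat (97 + b)) by decide,
    show "0123456789".toList = (List.range 10).map (fun c => Char.ofNat (48 + c)) by decide]
  simp only [List.flatMap_map, List.map_map, Function.comp_def]
  have hin : ∀ a : Nat,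
      (List.range 26).flatMap (fun b => (List.range 10).map
        (fun c => [Char.ofNat (65 + a), Char.ofNat (97 + b), Char.ofNat (48 + c)]))
      = (List.range 260).map (fun j =>
          [Char.ofNat (65 + a), Char.ofNat (97 + j / 10), Char.ofNat (48 + j % 10)]) :=
    fun a => pcProd 10 (by omega)
      (fun b c => [Char.ofNat (65 + a), Char.ofNat (97 + b), Char.ofNat (48 + c)]) 26
  simp only [hin]
  rw [pcProd 260 (by omega) (fun a j =>
    [Char.ofNat (65 + a), Char.ofNat (97 + j / 10), Char.ofNat (48 + j % 10)]) 26]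
  refine List.map_congr_left (fun k hk => ?_)
  have hk' : k < 6760 := List.mem_range.mp hk
  unfold pcGrp
  rw [show k % 260 / 10 = k / 10 % 26 by omega, show k % 260 % 10 = k % 10 by omega]

-- B's loop, fed the suffix of the generator starting at group k with k groups emitted,
-- appends groups k … pcStop
theorem pbLoop_out (length : Int) : ∀ (n k : Nat) (pat : List Char),
    k + n = 6760 → k ≤ pcStop length → pat.length = 3 * k →
    pbLoop ((List.range' k n).map pcGrp) pat length
      = pat ++ (List.range' k (pcStop length - k + 1)).flatMap pcGrp := by
  intro n
  induction n with
  | zero =>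
    intro k pat hkn hk _
    have := pcStop_le length; omega
  | succ m ih =>
    intro k pat hkn hk hp
    rw [List.range'_succ, List.map_cons]
    by_cases hc : pcGrp k ≠ ['Z', 'z', '9'] ∧ ((pat.length : Int) ≤ length)
    · have hk9 : k ≠ 6759 := fun h => hc.1 (h ▸ pcGrp_last)
      have hlen : (3 * (k : Int)) ≤ length := by
        have := hc.2; rw [hp] at this; exact_mod_cast this
      have hs : pcStop length = min (length.toNat / 3 + 1) 6759 := by
        unfold pcStop; rw [if_neg (by omega)]
      have hks : k < pcStop length := by rw [hs]; rw [hs] at hk; omega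
      rw [pbLoop, if_pos hc,
        ih (k + 1) (pat ++ pcGrp k) (by omega) (by omega)
          (by rw [List.length_append, hp, pcGrp_length]; omega)]
      rw [show pcStop length - k + 1 = (pcStop length - (k + 1)) + 1 + 1 by omega,
        List.range'_succ, List.flatMap_cons, List.range'_succ, List.flatMap_cons]
      simp [List.append_assoc]
      rw [List.range'_succ, List.flatMap_cons]
    · have hse : pcStop length = k := by
        rcases not_and_or.mp hc with h | h
        · have h' : pcGrp k = ['Z', 'z', '9'] := not_not.mp h
          have := pcGrp_eq_last h'
          have := pcStop_le length
          omega
        · have h' : ¬ ((3 * (k : Int)) ≤ length) := by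
            intro h''; exact h (by rw [hp]; exact_mod_cast h'')
          have : pcStop length ≤ k := by
            unfold pcStop; split <;> omega
          omega
      rw [pbLoop, if_neg hc, hse]
      simp [List.range'_succ, List.flatMap_cons]

-- ===== VERDICT (by name: the statement is the Claim_ definition above) =====
theorem pattern_create_spec : Claim_equal_pattern_create := by
  intro length _
  unfold Spec_pattern_create pattern_create pattern_create_alt
  have hstop := pcStop_le length
  rw [show (['A', 'a', '0'] : List Char) = pcGrp 0 by decide]
  rw [pcLoop_out length 6760 0 [] (by omega) (by omega) (by simp)]
  rw [pbGroups_eq, pbLoop_out length 6760 0 [] (by omega) (by omega) (by simp)]
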